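-- pv_equiv track=rewrite | github.com/manufac-tech/mac-dot-report | db2_rep_df/db24_match_reg.py | assign_debug_characters
-- ===== SOURCE A (Python) =====
-- def assign_debug_characters(values, first_value):
--     debug_characters = ''
--     name_status = 'none'
--     if first_value:
--         name_status = 'match_special'  # Default to match_special
--         for val in values:
--             if val == first_value and val is not None:
--                 debug_characters += 'O'
--             elif val is None:
--                 debug_characters += '_'
--             else:
--                 debug_characters += 'X'
--                 name_status = 'none'  # Mismatch, so set to none
--         if all(val == first_value and val is not None for val in values):
--             name_status = 'match'
--     else:
--         debug_characters = '___'
--     return debug_characters, name_status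
-- ===== SOURCE B (Python) =====
-- def assign_debug_characters(values, first_value):
--     if not first_value:
--         return '___', 'none'
--     nones = values.count(None)
--     matches = values.count(first_value)
--     if matches + nones < len(values):
--         name_status = 'none'
--     elif nones:
--         name_status = 'match_special'
--     else:
--         name_status = 'match'
--     debug_characters = ''.join(
--         map(lambda v: 'O' if v == first_value else ('_' if v is None else 'X'), values))
--     return debug_characters, name_status
-- ===== Notes on version B (the rewrite author's own statement) =====
-- stated objective: alternative
-- what changed: B computes the status arithmetically from values.count(None) and values.count(first_value) against len(values) (no in-loop flag and no all() pass) and renders the debug string separately with a join over a per-value map, instead of A's single accumulating loop with status mutation plus a second all() scan.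
import Mathlib
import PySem

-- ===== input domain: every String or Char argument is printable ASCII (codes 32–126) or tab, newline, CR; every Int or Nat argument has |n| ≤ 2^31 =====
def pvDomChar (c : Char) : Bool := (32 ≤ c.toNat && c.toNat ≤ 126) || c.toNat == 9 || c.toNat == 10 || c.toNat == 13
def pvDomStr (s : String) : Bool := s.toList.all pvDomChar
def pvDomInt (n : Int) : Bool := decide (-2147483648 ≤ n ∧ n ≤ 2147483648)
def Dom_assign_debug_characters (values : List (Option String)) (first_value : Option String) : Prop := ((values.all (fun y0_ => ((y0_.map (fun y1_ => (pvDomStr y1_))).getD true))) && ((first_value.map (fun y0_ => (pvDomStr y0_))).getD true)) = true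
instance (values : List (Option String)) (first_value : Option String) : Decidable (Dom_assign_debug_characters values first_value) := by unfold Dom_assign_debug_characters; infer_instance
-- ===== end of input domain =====

-- B derives the status arithmetically from element counts (no in-loop flag, no all() pass)
-- and builds the debug string by structural recursion (objective: alternative).

-- ===== PORT A =====
-- Python truthiness of an Optional[str]: None and "" are falsy.
def pyTruthyOptStr (s : Option String) : Bool :=
  match s with
  | none => false
  | some t => t ≠ ""

def assign_debug_characters (values : List (Option String)) (first_value : Option String) : String × String :=
  if pyTruthyOptStr first_value then
    let st := values.foldl (fun (acc : String × String) val =>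
      if val = first_value ∧ val ≠ none then (acc.1 ++ "O", acc.2)
      else if val = none then (acc.1 ++ "_", acc.2)
      else (acc.1 ++ "X", "none")) ("", "match_special")
    let ns := if values.all (fun val => decide (val = first_value ∧ val ≠ none)) then "match" else st.2
    (st.1, ns)
  else ("___", "none")

-- ===== PORT B =====
-- Source B's ''.join(map(lambda v: ..., values)).
def adcClassify (first_value : Option String) (v : Option String) : Char :=
  if v = first_value then 'O' else if v = none then '_' else 'X'

def adcChars (values : List (Option String)) (first_value : Option String) : String :=
  String.ofList (values.map (adcClassify first_value))

def assign_debug_characters_alt (values : List (Option String)) (first_value : Option String) : String × String :=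
  if !pyTruthyOptStr first_value then ("___", "none")
  else
    let nones := PySem.List.count values none
    let matchc := PySem.List.count values first_value
    let ns := if matchc + nones < values.length then "none"
              else if nones ≠ 0 then "match_special"
              else "match"
    (adcChars values first_value, ns)

-- ===== PRECONDITION & SPEC =====
def Spec_assign_debug_characters (values : List (Option String)) (first_value : Option String) (out : String × String) : Prop := out = assign_debug_characters_alt values first_value
instance (values : List (Option String)) (first_value : Option String) (out : String × String) : Decidable (Spec_assign_debug_characters values first_value out) := by unfold Spec_assign_debug_characters; infer_instance

-- ===== CLAIM (what is proved, stated in full; the proofs are below) =====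
def Claim_equal_assign_debug_characters : Prop := ∀ (values : List (Option String)) (first_value : Option String), Dom_assign_debug_characters values first_value → Spec_assign_debug_characters values first_value (assign_debug_characters values first_value)

-- ===== LEMMAS AND PROOFS =====

-- a one-character string literal prepended to ofList l is ofList of the cons
theorem adc_lit_cons (s : String) (c : Char) (l : List Char) (h : s.toList = [c]) :
    s ++ String.ofList l = String.ofList (c :: l) := by
  apply String.toList_injective; simp [h]

-- Characterisation of A's loop for a non-none first_value:
-- string = adcChars, status flag = "none" iff some value is neither first_value nor none.
theorem adc_foldl_char (first_value : Option String) (hne : first_value ≠ none)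
    (values : List (Option String)) (init1 : String) (init2 : String) :
    values.foldl (fun (acc : String × String) val =>
      if val = first_value ∧ val ≠ none then (acc.1 ++ "O", acc.2)
      else if val = none then (acc.1 ++ "_", acc.2)
      else (acc.1 ++ "X", "none")) (init1, init2)
    = (init1 ++ adcChars values first_value,
       if values.any (fun v => !(v = first_value ∨ v = none : Bool)) then "none" else init2) := by
  induction values generalizing init1 init2 with
  | nil => simp [adcChars]
  | cons v vs ih =>
    simp only [List.foldl_cons, List.any_cons, adcChars, List.map_cons]
    by_cases h1 : v = first_value
    · have h2 : v ≠ none := h1 ▸ hne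
      rw [if_pos ⟨h1, h2⟩, ih]
      simp [adcChars, adcClassify, h1, String.append_assoc]
      exact adc_lit_cons _ _ _ rfl
    · rw [if_neg (by simp [h1])]
      by_cases h2 : v = none
      · rw [if_pos h2, ih]
        simp [adcChars, adcClassify, h1, h2, Ne.symm hne, String.append_assoc]
        exact adc_lit_cons _ _ _ rfl
      · rw [if_neg h2, ih]
        simp [adcChars, adcClassify, h1, h2, String.append_assoc]
        exact adc_lit_cons _ _ _ rfl

-- Counting facts: with first_value ≠ none, every element is counted exactly once among
-- {= first_value, = none, other}, so count fv + count none + countP other = length.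
theorem adc_count_split (first_value : Option String) (hne : first_value ≠ none)
    (values : List (Option String)) :
    values.count first_value + values.count none
      + values.countP (fun v => !(v = first_value ∨ v = none : Bool)) = values.length := by
  induction values with
  | nil => simp
  | cons v vs ih =>
    simp only [List.count_cons, List.countP_cons, List.length_cons]
    by_cases h1 : v = first_value <;> by_cases h2 : v = none
    · exact absurd (h1.symm.trans h2) hne
    · simp [h1, hne] at ih ⊢; omega
    · simp [h2, Ne.symm hne] at ih ⊢; omega
    · simp [h1, h2] at ih ⊢; omega

-- ===== VERDICT (by name: the statement is the Claim_ definition above) =====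
theorem assign_debug_characters_spec : Claim_equal_assign_debug_characters := by
  unfold Claim_equal_assign_debug_characters
  intro values first_value _
  unfold Spec_assign_debug_characters assign_debug_characters assign_debug_characters_alt
  cases hT : pyTruthyOptStr first_value with
  | false => simp
  | true =>
    have hne : first_value ≠ none := by
      cases first_value with
      | none => simp [pyTruthyOptStr] at hT
      | some s => simp
    simp only [Bool.not_true, Bool.false_eq_true, if_false, if_true]
    rw [adc_foldl_char first_value hne values "" "match_special"]
    simp only [String.empty_append]
    refine Prod.ext rfl ?_
    show (if values.all (fun val => decide (val = first_value ∧ val ≠ none)) then "match"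
          else if values.any (fun v => !(v = first_value ∨ v = none : Bool)) then "none"
          else "match_special") = _
    have hsplit := adc_count_split first_value hne values
    simp only [PySem.List.count_eq]
    by_cases hx : values.any (fun v => !(v = first_value ∨ v = none : Bool)) = true
    · -- some "other" element exists: count fv + count none < length; A's all() fails
      have hc : 0 < values.countP (fun v => !(v = first_value ∨ v = none : Bool)) := by
        rw [List.countP_pos_iff]
        obtain ⟨v, hv, hp⟩ := List.any_eq_true.mp hx
        exact ⟨v, hv, hp⟩
      have hlt : List.count first_value values + List.count none values < values.length := by
        omega
      rw [if_pos hlt, hx, if_pos rfl]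
      rw [if_neg]
      intro hall
      obtain ⟨v, hv, hp⟩ := List.any_eq_true.mp hx
      have h1 := of_decide_eq_true (List.all_eq_true.mp hall v hv)
      simp [h1.1] at hp
    · -- no "other" element
      have hc : values.countP (fun v => !(v = first_value ∨ v = none : Bool)) = 0 := by
        rw [List.countP_eq_zero]
        intro v hv
        by_contra h
        exact hx (List.any_eq_true.mpr ⟨v, hv, by simpa using h⟩)
      have hge : ¬ (List.count first_value values + List.count none values < values.length) := by
        omega
      rw [if_neg hge]
      by_cases hn : values.count (none : Option String) = 0
      · -- no None and no other: every element is first_value; both give "match"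
        have hall : values.all (fun val => decide (val = first_value ∧ val ≠ none)) = true := by
          rw [List.all_eq_true]
          intro v hv
          have h1 : v = first_value := by
            by_contra h
            by_cases h2 : v = none
            · exact absurd (List.count_pos_iff.mpr (h2 ▸ hv)) (by omega)
            · exact hx (List.any_eq_true.mpr ⟨v, hv, by simp [h, h2]⟩)
          exact decide_eq_true ⟨h1, h1 ▸ hne⟩
        rw [if_pos hall, if_neg (by simp [hn])]
      · -- a None exists: A's all() fails, both give "match_special"
        have hnall : ¬ values.all (fun val => decide (val = first_value ∧ val ≠ none)) = true := by
          intro hall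
          have hmem : (none : Option String) ∈ values :=
            List.count_pos_iff.mp (Nat.pos_of_ne_zero hn)
          have h1 := of_decide_eq_true (List.all_eq_true.mp hall none hmem)
          exact h1.2 rfl
        rw [if_neg hnall, if_neg hx, if_pos hn]
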